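-- pv_equiv track=rewrite | github.com/j123kaishichufa/RS17_project_program | split/coreprocess/optionA-enum/analyzeProcessOverlapRes_f.py | getShortParaList
-- ===== SOURCE A (Python) =====
-- def getShortParaList(paraList):
--     oneList = list()
--     for para in paraList:
--         arr = para.split('.')
--         if len(arr) > 2:
--             shortname = arr[len(arr) - 2] + '.' + arr[len(arr) - 1]
--         else:
--             shortname = para
--         oneList.append(shortname)
--     return oneList
-- ===== SOURCE B (Python) =====
-- def _shorten(para):
--     # scan from the right; stop at the second dot from the end
--     acc = []
--     dots = 0
--     for ch in reversed(para):
--         if ch == '.':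
--             dots += 1
--             if dots == 2:
--                 break
--             acc.append(ch)
--         else:
--             acc.append(ch)
--     if dots == 2:
--         acc.reverse()
--         return ''.join(acc)
--     return para
--
--
-- def getShortParaList(paraList):
--     return [_shorten(para) for para in paraList]
-- ===== Notes on version B (the rewrite author's own statement) =====
-- stated objective: alternative
-- what changed: Instead of building the full split('.') list and re-joining its last two elements, B scans each string once from the right, stopping at the second dot from the end and keeping the suffix after it (unchanged string if fewer than two dots).
import Mathlib
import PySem

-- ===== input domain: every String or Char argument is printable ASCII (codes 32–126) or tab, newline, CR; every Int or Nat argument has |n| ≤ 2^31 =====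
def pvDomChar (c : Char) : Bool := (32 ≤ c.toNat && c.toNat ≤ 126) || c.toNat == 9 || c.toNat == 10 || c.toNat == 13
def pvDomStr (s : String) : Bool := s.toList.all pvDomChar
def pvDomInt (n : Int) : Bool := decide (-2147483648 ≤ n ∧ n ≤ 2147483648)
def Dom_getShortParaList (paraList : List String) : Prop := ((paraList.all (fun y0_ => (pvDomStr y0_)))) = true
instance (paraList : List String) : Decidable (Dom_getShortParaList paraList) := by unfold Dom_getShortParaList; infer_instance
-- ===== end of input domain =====

-- B replaces split('.')-and-rejoin by a single right-to-left scan that stops at the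
-- second dot from the end; return values proved equal on all inputs (no mutation involved).

-- ===== PORT A =====
-- loop body of A: arr = para.split('.'); if len(arr) > 2: arr[-2] + '.' + arr[-1] else para
-- (the two indices len(arr)-2, len(arr)-1 are always in range when len(arr) > 2,
--  so the Python indexing never raises; ported with pyGetD, default never used)
def pvShortA (para : String) : String :=
  let arr := PySem.Chars.splitOn para.toList ['.']
  if arr.length > 2 then
    String.ofList (PySem.List.pyGetD arr ((arr.length : Int) - 2) [] ++
               '.' :: PySem.List.pyGetD arr ((arr.length : Int) - 1) [])
  else para

def getShortParaList (paraList : List String) : List String :=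
  paraList.foldl (fun oneList para => oneList ++ [pvShortA para]) []

-- ===== PORT B =====
-- inner loop of Source B's _shorten: walk the reversed characters, counting dots,
-- appending each kept character to acc; break when the second dot is reached
def pvCollect : List Char → List Char → Nat → List Char × Nat
  | [], acc, dots => (acc, dots)
  | c :: rest, acc, dots =>
    if c = '.' then
      if dots + 1 = 2 then (acc, dots + 1)
      else pvCollect rest (acc ++ [c]) (dots + 1)
    else pvCollect rest (acc ++ [c]) dots

def pvShortenB (para : String) : String :=
  let r := pvCollect para.toList.reverse [] 0
  if r.2 = 2 then String.ofList r.1.reverse else para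

def getShortParaList_alt (paraList : List String) : List String :=
  paraList.map pvShortenB

-- ===== PRECONDITION & SPEC =====
def Spec_getShortParaList (paraList : List String) (out : List String) : Prop := out = getShortParaList_alt paraList
instance (paraList : List String) (out : List String) : Decidable (Spec_getShortParaList paraList out) := by unfold Spec_getShortParaList; infer_instance

-- ===== CLAIM (what is proved, stated in full; the proofs are below) =====
def Claim_equal_getShortParaList : Prop := ∀ (paraList : List String), Dom_getShortParaList paraList → Spec_getShortParaList paraList (getShortParaList paraList)

-- ===== LEMMAS AND PROOFS =====

-- reference version of para.split('.') used only in the proofs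
def split1 : List Char → List (List Char)
  | [] => [[]]
  | c :: rest => if c = '.' then [] :: split1 rest else (split1 rest).modifyHead (c :: ·)

theorem split1_ne_nil (cs : List Char) : split1 cs ≠ [] := by
  cases cs with
  | nil => simp [split1]
  | cons c rest =>
    by_cases hc : c = '.' <;> simp [split1, hc]
    cases hs : split1 rest with
    | nil => exact absurd hs (split1_ne_nil rest)
    | cons a t => simp

theorem go_spec (l : List Char) : ∀ (fuel : Nat) (cur : List Char) (acc : List (List Char)),
    l.length < fuel →
    PySem.Chars.splitOn.go ['.'] fuel l cur acc = acc.reverse ++ (split1 l).modifyHead (cur.reverse ++ ·) := by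
  induction l with
  | nil =>
    intro fuel cur acc h
    match fuel, h with
    | fuel+1, _ => simp [PySem.Chars.splitOn.go, split1]
  | cons c rest ih =>
    intro fuel cur acc h
    match fuel, h with
    | fuel+1, h =>
      by_cases hc : c = '.'
      · subst hc
        rw [show PySem.Chars.splitOn.go ['.'] (fuel+1) ('.'::rest) cur acc
              = PySem.Chars.splitOn.go ['.'] fuel rest [] (cur.reverse :: acc) by
            simp [PySem.Chars.splitOn.go]]
        rw [ih fuel [] (cur.reverse :: acc) (by simpa using h)]
        cases hs : split1 rest <;> simp [split1, hs]
      · rw [show PySem.Chars.splitOn.go ['.'] (fuel+1) (c::rest) cur acc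
              = PySem.Chars.splitOn.go ['.'] fuel rest (c :: cur) acc by
            simp [PySem.Chars.splitOn.go, List.isPrefixOf, Ne.symm hc]]
        rw [ih fuel (c :: cur) acc (by simpa using h)]
        simp only [split1, if_neg hc, List.modifyHead_modifyHead, List.reverse_cons,
          List.append_assoc, List.singleton_append]
        rfl

theorem splitOn_eq_split1 (cs : List Char) : PySem.Chars.splitOn cs ['.'] = split1 cs := by
  have h := go_spec cs (cs.length + 1) [] [] (by omega)
  have hid : (split1 cs).modifyHead (fun x => List.reverse [] ++ x) = split1 cs := by
    cases hs : split1 cs with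
    | nil => exact absurd hs (split1_ne_nil cs)
    | cons a t => simp
  rw [PySem.Chars.splitOn, h, hid]
  simp

theorem length_split1 (cs : List Char) : (split1 cs).length = cs.count '.' + 1 := by
  induction cs with
  | nil => simp [split1]
  | cons c rest ih =>
    by_cases hc : c = '.' <;>
      simp [split1, hc, ih]

theorem split1_count_zero (cs : List Char) (h : cs.count '.' = 0) : split1 cs = [cs] := by
  induction cs with
  | nil => simp [split1]
  | cons c rest ih =>
    have hc : c ≠ '.' := by
      intro hc; subst hc; simp at h
    have hr : rest.count '.' = 0 := by
      rw [List.count_cons] at h; omega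
    simp [split1, hc, ih hr]

theorem split1_append_dot (p q : List Char) :
    split1 (p ++ '.' :: q) = split1 p ++ split1 q := by
  induction p with
  | nil => simp [split1]
  | cons c rest ih =>
    by_cases hc : c = '.'
    · simp [split1, hc, ih]
    · simp only [List.cons_append, split1, if_neg hc, ih]
      cases hs : split1 rest with
      | nil => exact absurd hs (split1_ne_nil rest)
      | cons a t => simp

-- decomposition at the first dot of a string with exactly one dot
theorem decomp_one (cs : List Char) (h : cs.count '.' = 1) :
    ∃ q1 q2, cs = q1 ++ '.' :: q2 ∧ q1.count '.' = 0 ∧ q2.count '.' = 0 := by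
  induction cs with
  | nil => simp at h
  | cons c rest ih =>
    by_cases hc : c = '.'
    · subst hc
      have hr : rest.count '.' = 0 := by rw [List.count_cons] at h; simp only [beq_self_eq_true, if_true] at h; omega
      exact ⟨[], rest, by simp, by simp, hr⟩
    · have hr : rest.count '.' = 1 := by simpa [List.count_cons, hc] using h
      obtain ⟨q1, q2, he, h1, h2⟩ := ih hr
      exact ⟨c :: q1, q2, by simp [he], by simp [hc, h1], h2⟩

-- decomposition at the second-to-last dot of a string with at least two dots
theorem decomp_two (cs : List Char) (h : 2 ≤ cs.count '.') :
    ∃ p q1 q2, cs = p ++ '.' :: (q1 ++ '.' :: q2) ∧ q1.count '.' = 0 ∧ q2.count '.' = 0 := by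
  induction cs with
  | nil => simp at h
  | cons c rest ih =>
    by_cases hr : 2 ≤ rest.count '.'
    · obtain ⟨p, q1, q2, he, h1, h2⟩ := ih hr
      exact ⟨c :: p, q1, q2, by simp [he], h1, h2⟩
    · have hc : c = '.' := by
        by_contra hc; rw [List.count_cons] at h; simp [hc] at h; omega
      subst hc
      have h1 : rest.count '.' = 1 := by rw [List.count_cons] at h; simp only [beq_self_eq_true, if_true] at h; omega
      obtain ⟨q1, q2, he, hq1, hq2⟩ := decomp_one rest h1
      exact ⟨[], q1, q2, by simp [he], hq1, hq2⟩

theorem collect_low (l : List Char) : ∀ (acc : List Char) (dots : Nat),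
    l.count '.' + dots < 2 →
    pvCollect l acc dots = (acc ++ l, dots + l.count '.') := by
  induction l with
  | nil => intro acc dots h; simp [pvCollect]
  | cons c rest ih =>
    intro acc dots h
    by_cases hc : c = '.'
    · subst hc
      rw [List.count_cons] at h; simp only [beq_self_eq_true, if_true] at h
      have hd : ¬ (dots + 1 = 2) := by omega
      rw [pvCollect, if_pos rfl, if_neg hd, ih _ (dots + 1) (by omega)]
      rw [List.count_cons]
      simp; omega
    · rw [List.count_cons] at h; simp [hc] at h
      rw [pvCollect, if_neg hc, ih _ dots (by omega)]
      rw [List.count_cons]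
      simp [hc]

theorem collect_hit (l : List Char) : ∀ (t acc : List Char) (dots : Nat),
    l.count '.' + dots = 1 →
    pvCollect (l ++ '.' :: t) acc dots = (acc ++ l, 2) := by
  induction l with
  | nil =>
    intro t acc dots h
    simp at h
    subst h
    simp [pvCollect]
  | cons c rest ih =>
    intro t acc dots h
    by_cases hc : c = '.'
    · subst hc
      rw [List.count_cons] at h; simp only [beq_self_eq_true, if_true] at h
      have hd : dots = 0 := by omega
      subst hd
      rw [List.cons_append, pvCollect, if_pos rfl, if_neg (by omega),
          ih t _ 1 (by omega)]
      simp
    · rw [List.count_cons] at h; simp [hc] at h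
      rw [List.cons_append, pvCollect, if_neg hc, ih t _ dots h]
      simp

theorem short_eq (para : String) : pvShortA para = pvShortenB para := by
  set cs := para.toList with hcs
  by_cases h2 : 2 ≤ cs.count '.'
  · obtain ⟨p, q1, q2, he, hq1, hq2⟩ := decomp_two cs h2
    have harr : PySem.Chars.splitOn cs ['.'] = split1 p ++ [q1, q2] := by
      rw [splitOn_eq_split1, he, split1_append_dot, split1_append_dot,
          split1_count_zero q1 hq1, split1_count_zero q2 hq2]
      simp
    have hA : pvShortA para = String.ofList (q1 ++ '.' :: q2) := by
      simp only [pvShortA, ← hcs, harr]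
      rw [if_pos (by simp [List.length_pos_iff, split1_ne_nil p])]
      congr 1
      have e1 : PySem.List.pyGetD (split1 p ++ [q1, q2]) (((split1 p ++ [q1, q2]).length : Int) - 2) [] = q1 := by
        rw [show (((split1 p ++ [q1, q2]).length : Int) - 2) = (((split1 p).length : Nat) : Int) by
          simp only [List.length_append, List.length_cons, List.length_nil]; omega]
        rw [PySem.List.pyGetD_natCast]
        simp
      have e2 : PySem.List.pyGetD (split1 p ++ [q1, q2]) (((split1 p ++ [q1, q2]).length : Int) - 1) [] = q2 := by
        rw [show (((split1 p ++ [q1, q2]).length : Int) - 1) = (((split1 p).length + 1 : Nat) : Int) by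
          simp only [List.length_append, List.length_cons, List.length_nil]; omega]
        rw [PySem.List.pyGetD_natCast]
        simp
      rw [e1, e2]
    have hrev : cs.reverse = (q1 ++ '.' :: q2).reverse ++ '.' :: p.reverse := by
      rw [he]; simp
    have hcnt : (q1 ++ '.' :: q2).reverse.count '.' = 1 := by
      simp [List.count_append, hq1, hq2]
    have hB : pvShortenB para = String.ofList (q1 ++ '.' :: q2) := by
      simp only [pvShortenB, ← hcs, hrev]
      rw [collect_hit _ _ _ _ (by omega)]
      simp
    rw [hA, hB]
  · have hA : pvShortA para = para := by
      simp only [pvShortA, ← hcs, splitOn_eq_split1]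
      rw [if_neg (by rw [length_split1]; omega)]
    have hB : pvShortenB para = para := by
      have hlt : cs.reverse.count '.' + 0 < 2 := by rw [List.count_reverse]; omega
      simp only [pvShortenB, ← hcs]
      rw [collect_low _ _ _ hlt]
      have hne : cs.count '.' ≠ 2 := by omega
      simp [List.count_reverse, hne]
    rw [hA, hB]

-- ===== VERDICT (by name: the statement is the Claim_ definition above) =====
theorem getShortParaList_spec : Claim_equal_getShortParaList := by
  intro paraList _
  unfold Spec_getShortParaList getShortParaList getShortParaList_alt
  rw [PySem.List.foldl_append_singleton_eq_map]
  exact List.map_congr_left (fun para _ => short_eq para)
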